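-- pv_equiv track=rewrite | github.com/emmerichmtm/CDF-HVI | main_level_curve_with_correlated_gaussian.py | remove_dominated_points
-- ===== SOURCE A (Python) =====
-- def remove_dominated_points(points):
--     marker_for_removal = []
--     for i in range(len(points)):
--         for j in range(len(points)):
--             if (points[i][0] < points[j][0] and points[i][1] <= points[j][1]) or (
--                     points[i][0] <= points[j][0] and points[i][1] < points[j][1]):
--                 marker_for_removal.append(j)
--     # Create new list of points that are not marked for removal
--     points = [points[i] for i in range(len(points)) if i not in marker_for_removal]
--     return points
-- ===== SOURCE B (Python) =====
-- def remove_dominated_points(points):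
--     # Sort-and-sweep Pareto filter (minimization, first two coordinates):
--     # sort indices lexicographically by (x, y); any dominator of a point is
--     # strictly lex-smaller, so a single left-to-right sweep that tracks
--     # m      = min y among all points already swept, and
--     # mprev  = min y among swept points with strictly smaller x
--     # decides domination: p is dominated iff m < p.y or mprev <= p.y.
--     n = len(points)
--     order = sorted(range(n), key=lambda i: (points[i][0], points[i][1]))
--     keep = [True] * n
--     m = None          # min y among swept points
--     mprev = None      # min y among swept points with x < current x
--     last_x = None
--     for i in order:
--         x, y = points[i][0], points[i][1]
--         if last_x is not None and x != last_x:
--             mprev = m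
--         if (m is not None and m < y) or (mprev is not None and mprev <= y):
--             keep[i] = False
--         if m is None or y < m:
--             m = y
--         last_x = x
--     return [points[i] for i in range(n) if keep[i]]
-- ===== Notes on version B (the rewrite author's own statement) =====
-- stated objective: faster
-- what changed: Replaces the all-pairs domination scan plus repeated 'i not in marker' list-membership passes by sorting indices lexicographically by (x,y) and one sweep maintaining two running y-minima that decide domination.
import Mathlib
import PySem

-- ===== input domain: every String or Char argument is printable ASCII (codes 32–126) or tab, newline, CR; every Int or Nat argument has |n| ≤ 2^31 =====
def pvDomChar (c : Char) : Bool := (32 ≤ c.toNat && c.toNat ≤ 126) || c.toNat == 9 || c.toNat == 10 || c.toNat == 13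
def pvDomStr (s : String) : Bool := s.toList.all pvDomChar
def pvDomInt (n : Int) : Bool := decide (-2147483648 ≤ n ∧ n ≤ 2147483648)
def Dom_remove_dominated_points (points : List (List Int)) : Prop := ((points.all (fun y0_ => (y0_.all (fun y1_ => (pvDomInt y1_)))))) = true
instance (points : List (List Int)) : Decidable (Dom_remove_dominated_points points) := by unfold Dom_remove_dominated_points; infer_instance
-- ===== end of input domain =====

-- B replaces A's all-pairs domination scan (plus linear `i not in marker` membership passes)
-- by a sort of the indices by (x, y) and one sweep tracking two running y-minima; return value only, no mutation.

-- ===== PORT A =====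
-- A's domination test `(p[0] < q[0] and p[1] <= q[1]) or (p[0] <= q[0] and p[1] < q[1])`;
-- pyGetD's defaults are never used under Pre_ (every point has ≥ 2 coordinates, indices come from range(len)).
def pvBeats (p q : List Int) : Bool :=
  (decide (PySem.List.pyGetD p 0 0 < PySem.List.pyGetD q 0 0) && decide (PySem.List.pyGetD p 1 0 ≤ PySem.List.pyGetD q 1 0)) ||
  (decide (PySem.List.pyGetD p 0 0 ≤ PySem.List.pyGetD q 0 0) && decide (PySem.List.pyGetD p 1 0 < PySem.List.pyGetD q 1 0))

def remove_dominated_points (points : List (List Int)) : List (List Int) :=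
  let n : Int := points.length
  let marker_for_removal : List Int :=
    (PySem.List.pyRange 0 n 1).foldl (fun acc i =>
      (PySem.List.pyRange 0 n 1).foldl (fun acc2 j =>
        if pvBeats (PySem.List.pyGetD points i []) (PySem.List.pyGetD points j []) then acc2 ++ [j] else acc2) acc) []
  (PySem.List.pyRange 0 n 1).foldl (fun acc i =>
    if !(marker_for_removal.contains i) then acc ++ [PySem.List.pyGetD points i []] else acc) []

-- ===== PORT B =====
-- key=lambda i: (points[i][0], points[i][1])  (Python tuple order = lexicographic)
def pvKeyB (points : List (List Int)) (i : Int) : Lex (Int × Int) :=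
  toLex (PySem.List.pyGetD (PySem.List.pyGetD points i []) 0 0,
         PySem.List.pyGetD (PySem.List.pyGetD points i []) 1 0)

-- 'm is not None and m < y' / 'mprev is not None and mprev <= y' / 'y if m is None or y < m else m'
def pvLtOpt (m : Option Int) (y : Int) : Bool := match m with | some v => decide (v < y) | none => false
def pvLeOpt (m : Option Int) (y : Int) : Bool := match m with | some v => decide (v ≤ y) | none => false
def pvMinOpt (m : Option Int) (y : Int) : Option Int :=
  match m with | none => some y | some v => if y < v then some y else some v

-- the loop body of Source B's sweep; state = (keep, m, mprev, last_x)
def pvSweepStep (points : List (List Int))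
    (st : List Bool × Option Int × Option Int × Option Int) (i : Int) :
    List Bool × Option Int × Option Int × Option Int :=
  let keep := st.1
  let m := st.2.1
  let mprev := st.2.2.1
  let lastX := st.2.2.2
  let x := PySem.List.pyGetD (PySem.List.pyGetD points i []) 0 0
  let y := PySem.List.pyGetD (PySem.List.pyGetD points i []) 1 0
  let mprev1 := if lastX.isSome && (lastX != some x) then m else mprev
  let keep1 := if (pvLtOpt m y || pvLeOpt mprev1 y) then keep.set i.toNat false else keep
  let m1 := pvMinOpt m y
  (keep1, m1, mprev1, some x)

def remove_dominated_points_alt (points : List (List Int)) : List (List Int) :=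
  let n : Int := points.length
  let order := PySem.List.sorted (PySem.List.pyRange 0 n 1) (pvKeyB points)
  let st := order.foldl (pvSweepStep points) (List.replicate n.toNat true, none, none, none)
  let keep := st.1
  (PySem.List.pyRange 0 n 1).foldl (fun acc i =>
    if PySem.List.pyGetD keep i false then acc ++ [PySem.List.pyGetD points i []] else acc) []

-- ===== PRECONDITION & SPEC =====
-- Pre_ excludes exactly the inputs where Python A raises IndexError: a nonempty list containing a
-- point with fewer than 2 coordinates (every point's [0] and [1] are read, including at i = j).
def Pre_remove_dominated_points (points : List (List Int)) : Prop :=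
  ∀ p ∈ points, 2 ≤ p.length
instance (points : List (List Int)) : Decidable (Pre_remove_dominated_points points) := by
  unfold Pre_remove_dominated_points; infer_instance
def pvWitness_remove_dominated_points : List (List Int) := [[0, 0], [1, 2]]

def Spec_remove_dominated_points (points : List (List Int)) (out : List (List Int)) : Prop := out = remove_dominated_points_alt points
instance (points : List (List Int)) (out : List (List Int)) : Decidable (Spec_remove_dominated_points points out) := by unfold Spec_remove_dominated_points; infer_instance

-- ===== CLAIM (what is proved, stated in full; the proofs are below) =====
def Claim_equal_remove_dominated_points : Prop := ∀ (points : List (List Int)), Dom_remove_dominated_points points → Pre_remove_dominated_points points → Spec_remove_dominated_points points (remove_dominated_points points)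

-- ===== LEMMAS AND PROOFS =====

-- abbreviations used only by the proofs
def pvP (points : List (List Int)) (i : Int) : List Int := PySem.List.pyGetD points i []
def pvX (points : List (List Int)) (i : Int) : Int := PySem.List.pyGetD (pvP points i) 0 0
def pvY (points : List (List Int)) (i : Int) : Int := PySem.List.pyGetD (pvP points i) 1 0
-- "some index in S dominates i"
def pvBeatenBy (points : List (List Int)) (S : List Int) (i : Int) : Bool :=
  S.any (fun j => pvBeats (pvP points j) (pvP points i))

theorem pvBeats_iff (points : List (List Int)) (j i : Int) :
    pvBeats (pvP points j) (pvP points i) = true ↔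
      ((pvX points j < pvX points i ∧ pvY points j ≤ pvY points i) ∨
       (pvX points j ≤ pvX points i ∧ pvY points j < pvY points i)) := by
  simp [pvBeats, pvP, pvX, pvY]

theorem pvKey_le_iff (points : List (List Int)) (j i : Int) :
    pvKeyB points j ≤ pvKeyB points i ↔
      (pvX points j < pvX points i ∨ (pvX points j = pvX points i ∧ pvY points j ≤ pvY points i)) := by
  rw [pvKeyB, pvKeyB, Prod.Lex.le_iff]
  simp [pvX, pvY, pvP]

theorem pvBeats_key_lt (points : List (List Int)) (j i : Int)
    (h : pvBeats (pvP points j) (pvP points i) = true) : ¬ (pvKeyB points i ≤ pvKeyB points j) := by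
  rw [pvBeats_iff] at h
  rw [pvKey_le_iff]
  rcases h with ⟨h1, h2⟩ | ⟨h1, h2⟩ <;> rintro (h3 | ⟨h3, h4⟩) <;> omega

theorem pvBeats_self (points : List (List Int)) (i : Int) :
    pvBeats (pvP points i) (pvP points i) = false := by
  simp [pvBeats]

-- min? of an appended singleton
theorem pvMin?_append_singleton (l : List Int) (a : Int) :
    (l ++ [a]).min? = some (match l.min? with | none => a | some m => min m a) := by
  induction l with
  | nil => simp
  | cons x xs ih => cases h : xs.min? <;> simp_all [List.min?_cons]

-- the sweep decision equals "dominated by some already-swept index"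
theorem pvDecision_eq (points : List (List Int)) (done : List Int) (t : Int)
    (hkeys : ∀ j ∈ done, pvKeyB points j ≤ pvKeyB points t) :
    (pvLtOpt (done.map (pvY points)).min? (pvY points t) ||
     pvLeOpt ((done.filter (fun j => decide (pvX points j < pvX points t))).map (pvY points)).min?
       (pvY points t)) = pvBeatenBy points done t := by
  rw [Bool.eq_iff_iff]
  simp only [Bool.or_eq_true, pvBeatenBy, List.any_eq_true, pvLtOpt, pvLeOpt]
  constructor
  · rintro (h | h)
    · rcases hm : (done.map (pvY points)).min? with _ | mv <;> rw [hm] at h <;> simp at h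
      rcases List.mem_map.mp (List.min?_eq_some_iff.mp hm).1 with ⟨j, hj, hYj⟩
      refine ⟨j, hj, ?_⟩
      rw [pvBeats_iff]
      have hk := (pvKey_le_iff points j t).mp (hkeys j hj)
      right
      constructor
      · omega
      · omega
    · rcases hm : ((done.filter (fun j => decide (pvX points j < pvX points t))).map (pvY points)).min?
        with _ | v <;> rw [hm] at h <;> simp at h
      rcases List.mem_map.mp (List.min?_eq_some_iff.mp hm).1 with ⟨j, hj, hYj⟩
      rcases List.mem_filter.mp hj with ⟨hjd, hjx⟩
      refine ⟨j, hjd, ?_⟩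
      rw [pvBeats_iff]
      left
      simp at hjx
      omega
  · rintro ⟨j, hj, hdom⟩
    rw [pvBeats_iff] at hdom
    rcases hdom with ⟨h1, h2⟩ | ⟨h1, h2⟩
    · right
      have hjf : j ∈ done.filter (fun j => decide (pvX points j < pvX points t)) :=
        List.mem_filter.mpr ⟨hj, by simpa using h1⟩
      have hmem : pvY points j ∈ (done.filter (fun j => decide (pvX points j < pvX points t))).map (pvY points) :=
        List.mem_map.mpr ⟨j, hjf, rfl⟩
      rcases hm : ((done.filter (fun j => decide (pvX points j < pvX points t))).map (pvY points)).min?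
        with _ | v
      · rw [List.min?_eq_none_iff] at hm; simp [hm] at hmem
      · have := (List.min?_eq_some_iff.mp hm).2 _ hmem
        simp
        omega
    · left
      have hmem : pvY points j ∈ done.map (pvY points) := List.mem_map.mpr ⟨j, hj, rfl⟩
      rcases hm : (done.map (pvY points)).min? with _ | mv
      · rw [List.min?_eq_none_iff] at hm; simp [hm] at hmem
      · have := (List.min?_eq_some_iff.mp hm).2 _ hmem
        simp
        omega

theorem pvX_raw (points : List (List Int)) (i : Int) :
    PySem.List.pyGetD (PySem.List.pyGetD points i []) 0 0 = pvX points i := rfl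
theorem pvY_raw (points : List (List Int)) (i : Int) :
    PySem.List.pyGetD (PySem.List.pyGetD points i []) 1 0 = pvY points i := rfl

-- main sweep invariant
theorem pvSweep_inv (points : List (List Int)) (n : Int) :
    ∀ (todo done : List Int) (keep : List Bool) (lastX : Option Int) (mprev : Option Int),
      (done ++ todo).Pairwise (fun a b => pvKeyB points a ≤ pvKeyB points b) →
      (done ++ todo).Nodup →
      (∀ i ∈ done ++ todo, 0 ≤ i ∧ i < n) →
      keep.length = n.toNat →
      (∀ i : Int, 0 ≤ i → i < n →
        keep.getD i.toNat true = if i ∈ done then !(pvBeatenBy points done i) else true) →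
      ((done = [] ∧ lastX = none) ∨
        (∃ lx, lastX = some lx ∧ (∀ j ∈ done, pvX points j ≤ lx) ∧ (∃ j ∈ done, pvX points j = lx))) →
      (match lastX with
        | none => mprev = none
        | some lx => mprev = ((done.filter (fun j => decide (pvX points j < lx))).map (pvY points)).min?) →
      ((todo.foldl (pvSweepStep points) (keep, (done.map (pvY points)).min?, mprev, lastX)).1.length = n.toNat ∧
       (∀ i : Int, 0 ≤ i → i < n →
        (todo.foldl (pvSweepStep points) (keep, (done.map (pvY points)).min?, mprev, lastX)).1.getD i.toNat true =
          if i ∈ done ++ todo then !(pvBeatenBy points (done ++ todo) i) else true)) := by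
  intro todo
  induction todo with
  | nil =>
    intro done keep lastX mprev hpair hnodup hmem hlen hkeep hlast hmprev
    simpa using ⟨hlen, by simpa using hkeep⟩
  | cons t rest ih =>
    intro done keep lastX mprev hpair hnodup hmem hlen hkeep hlast hmprev
    -- basic facts
    have hkeys : ∀ j ∈ done, pvKeyB points j ≤ pvKeyB points t := by
      have h := (List.pairwise_append.mp hpair).2.2
      intro j hj; exact h j hj t (by simp)
    have htnotin : t ∉ done := by
      have hd2 := List.disjoint_of_nodup_append hnodup
      intro hc; exact hd2 hc (by simp)
    have hXle : ∀ j ∈ done, pvX points j ≤ pvX points t := by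
      intro j hj
      have h := (pvKey_le_iff points j t).mp (hkeys j hj)
      omega
    have htb : 0 ≤ t ∧ t < n := hmem t (by simp)
    -- the updated mprev is the strict-smaller-x minimum for t
    have hmprev1_eq :
        (if lastX.isSome && (lastX != some (pvX points t)) then (done.map (pvY points)).min? else mprev) =
          ((done.filter (fun j => decide (pvX points j < pvX points t))).map (pvY points)).min? := by
      rcases hlast with ⟨hd, hl⟩ | ⟨lx, hl, hub, j0, hj0, hXj0⟩
      · subst hd hl
        have hmp : mprev = none := hmprev
        simp [hmp]
      · subst hl
        by_cases hxe : lx = pvX points t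
        · have hmp : mprev = ((done.filter (fun j => decide (pvX points j < lx))).map (pvY points)).min? := hmprev
          rw [if_neg (by simp [hxe]), hmp, hxe]
        · have hlt : lx < pvX points t := lt_of_le_of_ne (hXj0 ▸ hXle j0 hj0) hxe
          have hfe : done.filter (fun j => decide (pvX points j < pvX points t)) = done := by
            apply List.filter_eq_self.mpr
            intro j hj
            have h := hub j hj
            simp only [decide_eq_true_eq]
            omega
          rw [if_pos (by simp [hxe]), hfe]
    -- the decision bit equals "dominated by done"
    have hdec : (pvLtOpt (done.map (pvY points)).min? (pvY points t) ||
                 pvLeOpt (if lastX.isSome && (lastX != some (pvX points t)) then (done.map (pvY points)).min? else mprev)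
                   (pvY points t)) = pvBeatenBy points done t := by
      rw [hmprev1_eq]
      exact pvDecision_eq points done t hkeys
    -- the step in closed form
    have hstep : pvSweepStep points (keep, (done.map (pvY points)).min?, mprev, lastX) t =
        ((if pvBeatenBy points done t then keep.set t.toNat false else keep),
          (((done ++ [t]).map (pvY points)).min?,
           (if lastX.isSome && (lastX != some (pvX points t)) then (done.map (pvY points)).min? else mprev),
           some (pvX points t))) := by
      simp only [pvSweepStep, pvX_raw, pvY_raw]
      rw [hdec]
      have hm1 : pvMinOpt (done.map (pvY points)).min? (pvY points t) =
          ((done ++ [t]).map (pvY points)).min? := by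
        rw [List.map_append]
        simp only [List.map_cons, List.map_nil]
        rw [pvMin?_append_singleton, pvMinOpt.eq_def]
        rcases (done.map (pvY points)).min? with _ | mv
        · rfl
        · show (if pvY points t < mv then some (pvY points t) else some mv) =
              some (min mv (pvY points t))
          rw [min_def]
          split_ifs with h1 h2
          all_goals congr 1
          all_goals omega
      rw [hm1]
    -- the new keep satisfies the invariant for done ++ [t]
    have hkeep' : ∀ i : Int, 0 ≤ i → i < n →
        (if pvBeatenBy points done t then keep.set t.toNat false else keep).getD i.toNat true =
          if i ∈ done ++ [t] then !(pvBeatenBy points (done ++ [t]) i) else true := by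
      intro i hi0 hin
      have hdomt : pvBeatenBy points (done ++ [t]) t = pvBeatenBy points done t := by
        simp [pvBeatenBy, pvBeats_self]
      by_cases hit : i = t
      · subst hit
        have hold : keep.getD i.toNat true = true := by
          rw [hkeep i hi0 hin, if_neg htnotin]
        have hmemr : i ∈ done ++ [i] := by simp
        rw [if_pos hmemr, hdomt]
        cases hd : pvBeatenBy points done i
        · simpa using hold
        · rw [if_pos rfl, List.getD_eq_getElem?_getD,
             List.getElem?_set_self (by rw [hlen]; omega)]
          rfl
      · have hget : (if pvBeatenBy points done t then keep.set t.toNat false else keep).getD i.toNat true =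
            keep.getD i.toNat true := by
          cases pvBeatenBy points done t
          · rfl
          · rw [if_pos rfl, List.getD_eq_getElem?_getD, List.getD_eq_getElem?_getD,
               List.getElem?_set_ne (by omega)]
        rw [hget, hkeep i hi0 hin]
        have hmem' : (i ∈ done ++ [t]) ↔ i ∈ done := by simp [hit]
        by_cases hid : i ∈ done
        · rw [if_pos hid, if_pos (hmem'.mpr hid)]
          have heq : pvBeatenBy points (done ++ [t]) i = pvBeatenBy points done i := by
            have hnd : pvBeats (pvP points t) (pvP points i) = false := by
              cases hc : pvBeats (pvP points t) (pvP points i)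
              · rfl
              · exact absurd (hkeys i hid) (pvBeats_key_lt points t i hc)
            simp [pvBeatenBy, hnd]
          rw [heq]
        · rw [if_neg hid, if_neg (fun hc => hid (hmem'.mp hc))]
    -- apply the induction hypothesis to done ++ [t]
    have happ : (done ++ [t]) ++ rest = done ++ t :: rest := by simp
    have hres := ih (done ++ [t])
      (if pvBeatenBy points done t then keep.set t.toNat false else keep)
      (some (pvX points t))
      (if lastX.isSome && (lastX != some (pvX points t)) then (done.map (pvY points)).min? else mprev)
      (by rw [happ]; exact hpair)
      (by rw [happ]; exact hnodup)
      (by rw [happ]; exact hmem)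
      (by cases pvBeatenBy points done t <;> simp [hlen])
      hkeep'
      (by
        right
        refine ⟨pvX points t, rfl, ?_, ⟨t, by simp, rfl⟩⟩
        intro j hj
        rcases List.mem_append.mp hj with hj | hj
        · exact hXle j hj
        · simp at hj; subst hj; exact le_refl _)
      (by
        show (if lastX.isSome && (lastX != some (pvX points t)) then (done.map (pvY points)).min? else mprev) = _
        rw [hmprev1_eq]
        congr 1
        rw [List.filter_append]
        simp)
    rw [List.foldl_cons, hstep]
    rw [happ] at hres
    exact hres

theorem remove_dominated_points_eq (points : List (List Int)) :
    remove_dominated_points points = remove_dominated_points_alt points := by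
  show (let n : Int := points.length;
    let marker_for_removal : List Int :=
      (PySem.List.pyRange 0 n 1).foldl (fun acc i =>
        (PySem.List.pyRange 0 n 1).foldl (fun acc2 j =>
          if pvBeats (PySem.List.pyGetD points i []) (PySem.List.pyGetD points j []) then acc2 ++ [j] else acc2) acc) [];
    (PySem.List.pyRange 0 n 1).foldl (fun acc i =>
      if !(marker_for_removal.contains i) then acc ++ [PySem.List.pyGetD points i []] else acc) []) =
    (let n : Int := points.length;
    let order := PySem.List.sorted (PySem.List.pyRange 0 n 1) (pvKeyB points);
    let st := order.foldl (pvSweepStep points) (List.replicate n.toNat true, none, none, none);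
    let keep := st.1;
    (PySem.List.pyRange 0 n 1).foldl (fun acc i =>
      if PySem.List.pyGetD keep i false then acc ++ [PySem.List.pyGetD points i []] else acc) [])
  simp only []
  set n : Int := (points.length : Int) with hn
  set rg := PySem.List.pyRange 0 n 1 with hrg
  set L := PySem.List.sorted rg (pvKeyB points) with hL
  set marker := rg.foldl (fun acc i =>
      rg.foldl (fun acc2 j =>
        if pvBeats (PySem.List.pyGetD points i []) (PySem.List.pyGetD points j []) then acc2 ++ [j] else acc2) acc) ([] : List Int)
    with hmarkerdef
  -- characterize the marker list
  have hflat : marker = rg.flatMap (fun a =>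
      (rg.filter (fun j => pvBeats (PySem.List.pyGetD points a []) (PySem.List.pyGetD points j []))).map id) := by
    rw [hmarkerdef]
    have h1 : ∀ (acc : List Int), ∀ a ∈ rg,
        rg.foldl (fun acc2 j =>
          if pvBeats (PySem.List.pyGetD points a []) (PySem.List.pyGetD points j []) then acc2 ++ [j] else acc2) acc =
        acc ++ (rg.filter (fun j => pvBeats (PySem.List.pyGetD points a []) (PySem.List.pyGetD points j []))).map id :=
      fun acc a _ => PySem.List.foldl_append_if _ id rg acc
    rw [PySem.List.foldl_congr_mem rg _ _ [] h1, PySem.List.foldl_append_eq_flatMap, List.nil_append]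
  have hmarker : ∀ i : Int, i ∈ rg → (!(marker.contains i)) = (!(pvBeatenBy points rg i)) := by
    intro i hi
    congr 1
    rw [Bool.eq_iff_iff]
    simp only [List.contains_iff_mem, hflat, List.mem_flatMap, List.mem_filter, List.map_id,
      pvBeatenBy, pvP, List.any_eq_true]
    constructor
    · rintro ⟨a, ha, _, hd⟩
      exact ⟨a, ha, hd⟩
    · rintro ⟨a, ha, hd⟩
      exact ⟨a, ha, hi, hd⟩
  -- run the sweep invariant on the sorted index list
  have hperm : L.Perm rg := PySem.List.sorted_perm rg (pvKeyB points) false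
  have hsweep := pvSweep_inv points n L [] (List.replicate n.toNat true) none none
    (by simpa using PySem.List.sorted_pairwise rg (pvKeyB points))
    (by
      rw [List.nil_append]
      exact (hperm.nodup_iff).mpr (PySem.List.nodup_pyRange_one 0 n))
    (by
      intro i hi
      rw [List.nil_append] at hi
      have := (PySem.List.mem_sorted rg (pvKeyB points) false i).mp hi
      have hb := (PySem.List.mem_pyRange_one).mp this
      exact ⟨hb.1, hb.2⟩)
    (List.length_replicate)
    (by
      intro i hi0 hin
      rw [if_neg (List.not_mem_nil)]
      rw [List.getD_eq_getElem?_getD, List.getElem?_replicate]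
      split_ifs <;> rfl)
    (Or.inl ⟨rfl, rfl⟩)
    rfl
  rcases hsweep with ⟨hlenF, hkeepF⟩
  rw [List.nil_append] at hkeepF
  simp only [List.map_nil, List.min?_nil] at hlenF hkeepF
  -- both final comprehensions
  rw [PySem.List.foldl_append_if, PySem.List.foldl_append_if, List.nil_append, List.nil_append]
  congr 1
  apply List.filter_congr
  intro i hi
  have hb := (PySem.List.mem_pyRange_one).mp hi
  have hiL : i ∈ L := (PySem.List.mem_sorted rg (pvKeyB points) false i).mpr hi
  have hdomLrg : pvBeatenBy points L i = pvBeatenBy points rg i := hperm.any_eq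
  have hkF := hkeepF i hb.1 hb.2
  rw [if_pos hiL, hdomLrg] at hkF
  rw [hmarker i hi]
  rw [PySem.List.pyGetD_eq_getElem _ false hb.1 (by rw [hlenF]; omega)]
  rw [List.getD_eq_getElem?_getD, List.getElem?_eq_getElem (by rw [hlenF]; omega)] at hkF
  simpa using hkF.symm

-- ===== VERDICT (by name: the statement is the Claim_ definition above) =====
theorem remove_dominated_points_spec : Claim_equal_remove_dominated_points := by
  intro points _ _
  exact remove_dominated_points_eq points
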